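-- pv_equiv track=rewrite | github.com/f4pga/prjxray | utils/segview.py | make_header_lines
-- ===== SOURCE A (Python) =====
-- def make_header_lines(all_bits):
--     """
--     Formats header lines
--     """
--     lines = []
--
--     # Bit names
--     bit_names = ["%d_%d" % (b[0], b[1]) for b in all_bits]
--     bit_len = 6
--     for i in range(bit_len):
--         line = ""
--         for j in range(len(all_bits)):
--             bstr = bit_names[j].ljust(bit_len).replace("_", "|")
--             line += bstr[i]
--         lines.append(line)
--
--     return lines
-- ===== SOURCE B (Python) =====
-- def make_header_lines(all_bits):
--     # Build the six rows back-to-front, computing each header character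
--     # directly by position arithmetic on the two decimal strings: no cell
--     # string is ever formatted, padded or replace()d.
--     rows = [[], [], [], [], [], []]
--     for b0, b1 in reversed(all_bits):
--         s0 = str(b0)
--         s1 = str(b1)
--         n0 = len(s0)
--         for i in range(6):
--             if i < n0:
--                 c = s0[i]
--             elif i == n0:
--                 c = '|'
--             else:
--                 k = i - n0 - 1
--                 c = s1[k] if k < len(s1) else ' '
--             rows[i].append(c)
--     return ["".join(reversed(r)) for r in rows]
-- ===== Notes on version B (the rewrite author's own statement) =====
-- stated objective: alternative
-- what changed: B never formats, pads or replace()s a cell string: it computes every header character directly by position arithmetic on the two decimal digit strings (digit, separator '|', or pad space by index comparison) and assembles the six rows back-to-front over the reversed bit list.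
import Mathlib
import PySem

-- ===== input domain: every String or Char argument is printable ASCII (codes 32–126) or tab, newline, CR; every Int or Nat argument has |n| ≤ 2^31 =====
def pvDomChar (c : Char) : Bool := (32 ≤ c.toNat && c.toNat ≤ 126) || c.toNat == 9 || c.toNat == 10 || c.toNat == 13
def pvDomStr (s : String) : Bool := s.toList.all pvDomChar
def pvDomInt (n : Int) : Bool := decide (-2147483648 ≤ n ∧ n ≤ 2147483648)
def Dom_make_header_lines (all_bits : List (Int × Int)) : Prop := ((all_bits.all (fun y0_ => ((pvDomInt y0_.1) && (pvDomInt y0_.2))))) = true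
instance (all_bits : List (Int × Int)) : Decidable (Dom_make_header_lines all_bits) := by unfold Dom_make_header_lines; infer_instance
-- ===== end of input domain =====

-- B replaces A's per-row cell formatting (ljust + replace) with direct
-- position arithmetic on the two digit strings, assembling rows back-to-front.


-- ===== PORT A =====
-- "%d_%d" % (a, b) is ported as str(a) ++ "_" ++ str(b) (exact for ints);
-- .ljust(6) as right-padding with spaces (exact); strings handled as List Char.
def make_header_lines (all_bits : List (Int × Int)) : List String :=
  let bit_names : List (List Char) :=
    all_bits.map (fun b => PySem.Int.toChars b.1 ++ ['_'] ++ PySem.Int.toChars b.2)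
  let bit_len : Nat := 6
  ((PySem.List.pyRange 0 (bit_len : Int) 1).foldl (fun lines i =>
    let line : List Char :=
      (PySem.List.pyRange 0 (all_bits.length : Int) 1).foldl (fun line j =>
        let bstr : List Char :=
          PySem.Chars.replace
            ((PySem.List.pyGetD bit_names j []) ++
              List.replicate (bit_len - (PySem.List.pyGetD bit_names j []).length) ' ')
            ['_'] ['|']
        line ++ [PySem.List.pyGetD bstr i ' ']) []
    lines ++ [String.mk line]) [])

-- ===== PORT B =====
-- the character Source B computes for row i of bit b: a digit of str(b0),
-- the '|' separator, a digit of str(b1), or a pad space, by index comparison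
def altCh (b : Int × Int) (i : Nat) : Char :=
  let s0 := PySem.Int.toChars b.1
  let s1 := PySem.Int.toChars b.2
  let n0 := s0.length
  if i < n0 then PySem.List.pyGetD s0 (i : Int) ' '
  else if i = n0 then '|'
  else
    let k := i - n0 - 1
    if k < s1.length then PySem.List.pyGetD s1 (k : Int) ' ' else ' '

-- Source B's loop over reversed(all_bits) appending to six row lists, then
-- "".join(reversed(r)); the six fixed-size rows are carried as a 6-tuple.
def make_header_lines_alt (all_bits : List (Int × Int)) : List String :=
  let rows :
      List Char × List Char × List Char × List Char × List Char × List Char :=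
    all_bits.reverse.foldl (fun r b =>
      (r.1 ++ [altCh b 0], r.2.1 ++ [altCh b 1], r.2.2.1 ++ [altCh b 2],
       r.2.2.2.1 ++ [altCh b 3], r.2.2.2.2.1 ++ [altCh b 4],
       r.2.2.2.2.2 ++ [altCh b 5])) ([], [], [], [], [], [])
  [String.mk rows.1.reverse, String.mk rows.2.1.reverse,
   String.mk rows.2.2.1.reverse, String.mk rows.2.2.2.1.reverse,
   String.mk rows.2.2.2.2.1.reverse, String.mk rows.2.2.2.2.2.reverse]

-- ===== PRECONDITION & SPEC =====
def Spec_make_header_lines (all_bits : List (Int × Int)) (out : List String) : Prop := out = make_header_lines_alt all_bits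
instance (all_bits : List (Int × Int)) (out : List String) : Decidable (Spec_make_header_lines all_bits out) := by unfold Spec_make_header_lines; infer_instance

-- ===== CLAIM =====
def Claim_equal_make_header_lines : Prop := ∀ (all_bits : List (Int × Int)), Dom_make_header_lines all_bits → Spec_make_header_lines all_bits (make_header_lines all_bits)

-- ===== LEMMAS AND PROOFS =====

-- proof-only helpers: A's padded cell of one bit and its i-th character
def pvName (b : Int × Int) : List Char :=
  PySem.Int.toChars b.1 ++ ['_'] ++ PySem.Int.toChars b.2

def pvCell (b : Int × Int) : List Char :=
  PySem.Chars.replace (pvName b ++ List.replicate (6 - (pvName b).length) ' ') ['_'] ['|']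

def pvG (i : Int) (b : Int × Int) : Char :=
  PySem.List.pyGetD (pvCell b) i ' '

-- A's inner loop over j builds the row of i-th characters
theorem pv_inner_eq (all_bits : List (Int × Int)) (i : Int) :
    (PySem.List.pyRange 0 (all_bits.length : Int) 1).foldl
      (fun line j =>
        line ++ [PySem.List.pyGetD
          (PySem.Chars.replace
            ((PySem.List.pyGetD (all_bits.map pvName) j []) ++
              List.replicate (6 - (PySem.List.pyGetD (all_bits.map pvName) j []).length) ' ')
            ['_'] ['|']) i ' ']) []
    = all_bits.map (pvG i) := by
  have h : ((all_bits.length : Int)) = ((all_bits.map pvName).length : Int) := by simp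
  rw [h,
    PySem.List.foldl_pyRange_zero_pyGetD' (all_bits.map pvName) []
      (fun line name =>
        line ++ [PySem.List.pyGetD
          (PySem.Chars.replace (name ++ List.replicate (6 - name.length) ' ') ['_'] ['|'])
          i ' ']) [],
    List.foldl_map,
    PySem.List.foldl_append_singleton_eq_map]
  simp [pvG, pvCell]

theorem pv_A_eq (all_bits : List (Int × Int)) :
    make_header_lines all_bits =
      [String.mk (all_bits.map (pvG 0)), String.mk (all_bits.map (pvG 1)),
       String.mk (all_bits.map (pvG 2)), String.mk (all_bits.map (pvG 3)),
       String.mk (all_bits.map (pvG 4)), String.mk (all_bits.map (pvG 5))] := by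
  have hr : PySem.List.pyRange 0 ((6 : Nat) : Int) 1 = [0, 1, 2, 3, 4, 5] := by decide
  unfold make_header_lines
  dsimp only
  rw [hr]
  simp only [List.foldl_cons, List.foldl_nil, List.nil_append]
  rw [show (fun b : Int × Int => PySem.Int.toChars b.1 ++ ['_'] ++ PySem.Int.toChars b.2) = pvName
        from rfl,
      pv_inner_eq all_bits 0, pv_inner_eq all_bits 1, pv_inner_eq all_bits 2,
      pv_inner_eq all_bits 3, pv_inner_eq all_bits 4, pv_inner_eq all_bits 5]
  simp

-- B's single reversed pass: the six accumulators collect the reversed rows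
theorem pv_B_inv (bs : List (Int × Int)) (r0 r1 r2 r3 r4 r5 : List Char) :
    bs.foldl (fun r b =>
      (r.1 ++ [altCh b 0], r.2.1 ++ [altCh b 1], r.2.2.1 ++ [altCh b 2],
       r.2.2.2.1 ++ [altCh b 3], r.2.2.2.2.1 ++ [altCh b 4],
       r.2.2.2.2.2 ++ [altCh b 5])) (r0, r1, r2, r3, r4, r5)
    = (r0 ++ bs.map (altCh · 0), r1 ++ bs.map (altCh · 1), r2 ++ bs.map (altCh · 2),
       r3 ++ bs.map (altCh · 3), r4 ++ bs.map (altCh · 4), r5 ++ bs.map (altCh · 5)) := by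
  induction bs generalizing r0 r1 r2 r3 r4 r5 with
  | nil => simp
  | cons b bs ih =>
    simp only [List.foldl_cons, List.map_cons]
    rw [ih]
    simp

theorem pv_B_eq (all_bits : List (Int × Int)) :
    make_header_lines_alt all_bits =
      [String.mk (all_bits.map (altCh · 0)), String.mk (all_bits.map (altCh · 1)),
       String.mk (all_bits.map (altCh · 2)), String.mk (all_bits.map (altCh · 3)),
       String.mk (all_bits.map (altCh · 4)), String.mk (all_bits.map (altCh · 5))] := by
  unfold make_header_lines_alt
  dsimp only
  rw [pv_B_inv all_bits.reverse [] [] [] [] [] []]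
  simp [List.map_reverse]

-- no character of a decimal digit list is '_'
theorem pv_digitChar_ne (m : Nat) : Nat.digitChar m ≠ '_' := by
  rcases Nat.lt_or_ge m 16 with h | h
  · interval_cases m <;> decide
  · have hstar : Nat.digitChar m = '*' := by
      unfold Nat.digitChar
      repeat rw [if_neg (by omega)]
    rw [hstar]; decide

theorem pv_toDigitsCore_mem (b fuel n : Nat) (acc : List Char) (c : Char)
    (hc : c ∈ Nat.toDigitsCore b fuel n acc) :
    c ∈ acc ∨ ∃ m, c = Nat.digitChar m := by
  induction fuel generalizing n acc with
  | zero => exact Or.inl hc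
  | succ fuel ih =>
    simp only [Nat.toDigitsCore] at hc
    split at hc
    · rcases List.mem_cons.mp hc with h | h
      · exact Or.inr ⟨n % b, h⟩
      · exact Or.inl h
    · rcases ih _ _ hc with h | h
      · rcases List.mem_cons.mp h with h' | h'
        · exact Or.inr ⟨n % b, h'⟩
        · exact Or.inl h'
      · exact Or.inr h

theorem pv_toChars_ne_underscore (n : Int) : '_' ∉ PySem.Int.toChars n := by
  intro hmem
  unfold PySem.Int.toChars at hmem
  have hd : ∀ m : Nat, '_' ∉ Nat.toDigits 10 m := by
    intro m hm
    rcases pv_toDigitsCore_mem 10 (m + 1) m [] '_' hm with h | ⟨k, h⟩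
    · simp at h
    · exact pv_digitChar_ne k h.symm
  split at hmem
  · rcases List.mem_cons.mp hmem with h | h
    · simp at h
    · exact hd _ h
  · exact hd _ hmem

-- replace.go skips a character that is not '_'
theorem pv_go_skip (c : Char) (t acc : List Char) (f : Nat) (hc : c ≠ '_') :
    PySem.Chars.replace.go ['_'] ['|'] (f + 1) (c :: t) acc
      = PySem.Chars.replace.go ['_'] ['|'] f t (c :: acc) := by
  have hp : List.isPrefixOf ['_'] (c :: t) = false := by
    simp [List.isPrefixOf]
    exact fun h => hc h.symm
  simp only [PySem.Chars.replace.go, hp]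
  simp

-- replace.go leaves a '_'-free list unchanged
theorem pv_go_clean (l acc : List Char) (fuel : Nat) (hf : l.length ≤ fuel)
    (hl : '_' ∉ l) :
    PySem.Chars.replace.go ['_'] ['|'] fuel l acc = acc.reverse ++ l := by
  induction l generalizing fuel acc with
  | nil => cases fuel <;> simp [PySem.Chars.replace.go]
  | cons c t ih =>
    cases fuel with
    | zero => simp at hf
    | succ f =>
      have hc : c ≠ '_' := fun h => hl (by simp [h])
      rw [pv_go_skip c t acc f hc,
        ih (c :: acc) f (by simp at hf ⊢; omega) (fun h => hl (by simp [h]))]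
      simp

-- replace.go on s0 ++ '_' :: rest with '_'-free s0, rest
theorem pv_go_one (s0 rest acc : List Char) (fuel : Nat)
    (hf : s0.length + 1 + rest.length ≤ fuel)
    (h0 : '_' ∉ s0) (hr : '_' ∉ rest) :
    PySem.Chars.replace.go ['_'] ['|'] fuel (s0 ++ '_' :: rest) acc
      = acc.reverse ++ s0 ++ '|' :: rest := by
  induction s0 generalizing fuel acc with
  | nil =>
    cases fuel with
    | zero => omega
    | succ f =>
      have hp : List.isPrefixOf ['_'] ('_' :: rest) = true := by
        simp [List.isPrefixOf]
      simp only [List.nil_append, PySem.Chars.replace.go, hp]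
      rw [show List.drop (['_'] : List Char).length ('_' :: rest) = rest from rfl]
      rw [pv_go_clean rest (['|'].reverse ++ acc) f (by simp at hf; omega) hr]
      simp
  | cons c t ih =>
    cases fuel with
    | zero => simp at hf
    | succ f =>
      have hc : c ≠ '_' := fun h => h0 (by simp [h])
      rw [List.cons_append, pv_go_skip c (t ++ '_' :: rest) acc f hc,
        ih (c :: acc) f (by simp at hf ⊢; omega) (fun h => h0 (by simp [h]))]
      simp

-- A's padded replaced cell, in closed form
theorem pv_cell_eq (b : Int × Int) :
    pvCell b = PySem.Int.toChars b.1 ++ '|' ::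
      (PySem.Int.toChars b.2 ++
        List.replicate (6 - (pvName b).length) ' ') := by
  unfold pvCell pvName
  have h0 := pv_toChars_ne_underscore b.1
  have h1 := pv_toChars_ne_underscore b.2
  have hpad : '_' ∉ List.replicate (6 - (PySem.Int.toChars b.1 ++ ['_'] ++ PySem.Int.toChars b.2).length) ' ' := by
    intro h
    have := List.eq_of_mem_replicate h
    simp at this
  rw [show (PySem.Int.toChars b.1 ++ ['_'] ++ PySem.Int.toChars b.2) ++
        List.replicate (6 - (PySem.Int.toChars b.1 ++ ['_'] ++ PySem.Int.toChars b.2).length) ' '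
      = PySem.Int.toChars b.1 ++ '_' ::
          (PySem.Int.toChars b.2 ++
            List.replicate (6 - (PySem.Int.toChars b.1 ++ ['_'] ++ PySem.Int.toChars b.2).length) ' ')
      by simp]
  unfold PySem.Chars.replace
  simp only [List.isEmpty_cons, Bool.false_eq_true, if_false]
  rw [pv_go_one _ _ [] _ (by simp; omega) h0
      (by
        intro h
        rcases List.mem_append.mp h with h | h
        · exact h1 h
        · exact hpad (by simpa using h))]
  simp

-- getD of a space pad is always ' '
theorem pv_getD_pad (m j : Nat) : (List.replicate m ' ').getD j ' ' = ' ' := by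
  rcases Nat.lt_or_ge j m with h | h
  · simp [List.getD, h]
  · have hl : (List.replicate m ' ' : List Char).length ≤ j := by simpa using h
    simp [List.getD, List.getElem?_eq_none_iff.mpr hl]

-- the key pointwise fact: B's arithmetic character = A's cell character
theorem pv_char_eq (b : Int × Int) (i : Nat) : altCh b i = pvG (i : Int) b := by
  unfold altCh pvG
  rw [pv_cell_eq b]
  set s0 := PySem.Int.toChars b.1 with hs0
  set s1 := PySem.Int.toChars b.2 with hs1
  rw [PySem.List.pyGetD_natCast]
  dsimp only
  rcases Nat.lt_trichotomy i s0.length with h | h | h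
  · rw [if_pos h, PySem.List.pyGetD_natCast]
    rw [List.getD_append _ _ _ _ h]
  · rw [if_neg (by omega), if_pos h]
    have : (s0 ++ '|' :: (s1 ++ List.replicate (6 - (pvName b).length) ' ')).getD i ' '
        = ('|' :: (s1 ++ List.replicate (6 - (pvName b).length) ' ')).getD (i - s0.length) ' ' := by
      rw [List.getD_append_right _ _ _ _ (by omega)]
    rw [this, h]
    simp
  · rw [if_neg (by omega), if_neg (by omega)]
    have h1 : (s0 ++ '|' :: (s1 ++ List.replicate (6 - (pvName b).length) ' ')).getD i ' '
        = ('|' :: (s1 ++ List.replicate (6 - (pvName b).length) ' ')).getD (i - s0.length) ' ' := by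
      rw [List.getD_append_right _ _ _ _ (by omega)]
    rw [h1]
    have h2 : i - s0.length = (i - s0.length - 1) + 1 := by omega
    rw [h2]
    simp only [List.getD_cons_succ, Nat.add_sub_cancel]
    rcases Nat.lt_or_ge (i - s0.length - 1) s1.length with hk | hk
    · rw [if_pos hk, PySem.List.pyGetD_natCast]
      rw [List.getD_append _ _ _ _ hk]
    · rw [if_neg (by omega)]
      rw [List.getD_append_right _ _ _ _ hk, pv_getD_pad]

-- ===== VERDICT =====
theorem make_header_lines_spec : Claim_equal_make_header_lines := by
  intro all_bits _
  unfold Spec_make_header_lines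
  rw [pv_A_eq, pv_B_eq]
  have h : ∀ i : Nat, (altCh · i) = pvG (i : Int) := fun i => funext (fun b => pv_char_eq b i)
  rw [h 0, h 1, h 2, h 3, h 4, h 5]
  norm_num
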